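-- pv_equiv track=rewrite | github.com/kryptologyst/Time-Series-Analysis-with-Temporal-Convolutional-Networks | src/tcn.py | calculate_receptive_field
-- ===== SOURCE A (Python) =====
-- def calculate_receptive_field(
--     kernel_size: int,
--     num_layers: int,
--     dilation_base: int = 2
-- ) -> int:
--     """
--     Calculate the receptive field of a TCN.
--
--     Args:
--         kernel_size: Size of the convolution kernel
--         num_layers: Number of layers in the TCN
--         dilation_base: Base for exponential dilation
--
--     Returns:
--         Receptive field size
--     """
--     receptive_field = 1
--     for i in range(num_layers):
--         dilation = dilation_base ** i
--         receptive_field += (kernel_size - 1) * dilation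
--
--     return receptive_field
-- ===== SOURCE B (Python) =====
-- def calculate_receptive_field(
--     kernel_size: int,
--     num_layers: int,
--     dilation_base: int = 2
-- ) -> int:
--     # Closed-form geometric series instead of the per-layer loop.
--     if num_layers <= 0:
--         return 1
--     if dilation_base == 1:
--         s = num_layers
--     else:
--         s = (dilation_base ** num_layers - 1) // (dilation_base - 1)
--     return 1 + (kernel_size - 1) * s
-- ===== Notes on version B (the rewrite author's own statement) =====
-- stated objective: faster
-- what changed: Replaces the per-layer loop accumulating (kernel_size-1)*dilation_base**i by the closed-form geometric series sum 1 + (kernel_size-1)*(base**n - 1)//(base - 1), with base == 1 handled separately.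
import Mathlib
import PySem

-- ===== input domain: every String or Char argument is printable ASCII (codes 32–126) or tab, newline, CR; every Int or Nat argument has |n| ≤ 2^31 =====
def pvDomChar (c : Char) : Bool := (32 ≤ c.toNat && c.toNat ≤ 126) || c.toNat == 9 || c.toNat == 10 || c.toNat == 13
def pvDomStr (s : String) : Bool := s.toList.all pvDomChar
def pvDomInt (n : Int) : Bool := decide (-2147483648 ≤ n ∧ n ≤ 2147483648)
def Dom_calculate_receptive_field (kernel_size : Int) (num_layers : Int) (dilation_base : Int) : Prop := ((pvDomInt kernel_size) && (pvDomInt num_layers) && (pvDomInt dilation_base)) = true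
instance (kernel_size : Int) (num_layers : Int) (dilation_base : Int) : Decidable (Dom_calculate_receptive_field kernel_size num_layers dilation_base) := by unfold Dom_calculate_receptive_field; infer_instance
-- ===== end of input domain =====

-- ===== PORT A =====
def calculate_receptive_field (kernel_size : Int) (num_layers : Int) (dilation_base : Int) : Int :=
  (PySem.List.pyRange 0 num_layers 1).foldl
    (fun receptive_field i =>
      let dilation := dilation_base ^ i.toNat
      receptive_field + (kernel_size - 1) * dilation) 1

-- ===== PORT B =====
-- B: closed-form geometric series (faster: single fast pow instead of a per-layer loop)
def calculate_receptive_field_alt (kernel_size : Int) (num_layers : Int) (dilation_base : Int) : Int :=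
  if num_layers ≤ 0 then 1
  else
    let s : Int :=
      if dilation_base = 1 then num_layers
      else PySem.Int.floordiv (dilation_base ^ num_layers.toNat - 1) (dilation_base - 1)
    1 + (kernel_size - 1) * s

-- ===== PRECONDITION & SPEC =====
def Spec_calculate_receptive_field (kernel_size : Int) (num_layers : Int) (dilation_base : Int) (out : Int) : Prop := out = calculate_receptive_field_alt kernel_size num_layers dilation_base
instance (kernel_size : Int) (num_layers : Int) (dilation_base : Int) (out : Int) : Decidable (Spec_calculate_receptive_field kernel_size num_layers dilation_base out) := by unfold Spec_calculate_receptive_field; infer_instance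

-- ===== CLAIM (what is proved, stated in full; the proofs are below) =====
def Claim_equal_calculate_receptive_field : Prop := ∀ (kernel_size : Int) (num_layers : Int) (dilation_base : Int), Dom_calculate_receptive_field kernel_size num_layers dilation_base → Spec_calculate_receptive_field kernel_size num_layers dilation_base (calculate_receptive_field kernel_size num_layers dilation_base)

-- ===== LEMMAS AND PROOFS =====

-- ===== VERDICT (by name: the statement is the Claim_ definition above) =====

lemma foldl_geom (k b : Int) (n : Nat) :
    List.foldl (fun (x : Int) (y : Nat) => x + (k - 1) * b ^ ((0 + (y : Int)).toNat)) 1 (List.range n)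
      = 1 + (k - 1) * ∑ i ∈ Finset.range n, b ^ i := by
  induction n with
  | zero => simp
  | succ m ih =>
      rw [List.range_succ, List.foldl_append, ih, Finset.sum_range_succ]
      simp [mul_add]
      ring

theorem calculate_receptive_field_spec : Claim_equal_calculate_receptive_field := by
  intro k n b _
  unfold Spec_calculate_receptive_field calculate_receptive_field calculate_receptive_field_alt
  rw [PySem.List.pyRange_one, List.foldl_map]
  rw [show ((n : Int) - 0) = n from by ring]
  rw [foldl_geom k b n.toNat]
  by_cases hn : n ≤ 0
  · have : n.toNat = 0 := by omega
    simp [hn, this]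
  · simp only [if_neg hn]
    by_cases hb : b = 1
    · subst hb
      simp [Finset.sum_const, Int.toNat_of_nonneg (by omega : (0:Int) ≤ n)]
    · have hb1 : b - 1 ≠ 0 := by
        intro h; exact hb (by omega)
      have hgeom : b ^ n.toNat - 1 = (∑ i ∈ Finset.range n.toNat, b ^ i) * (b - 1) :=
        (geom_sum_mul b n.toNat).symm
      simp only [if_neg hb, hgeom]
      rw [show PySem.Int.floordiv ((∑ i ∈ Finset.range n.toNat, b ^ i) * (b - 1)) (b - 1)
            = ∑ i ∈ Finset.range n.toNat, b ^ i from ?_]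
      · unfold PySem.Int.floordiv
        exact Int.mul_fdiv_cancel _ hb1
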